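-- pv_equiv track=rewrite | github.com/thinkamin/MyDailyExercise | 2021-7-31-54.py | max_concennate
-- ===== SOURCE A (Python) =====
-- def max_concennate(A):
--     radix = 10
--     f_lst = []
--     for item in A:
--         m = len(str(item))
--         m = m-1
--         first_digit = item//pow(radix,m)%10
--         f_lst.append(first_digit)
--     f_dict = dict(zip(f_lst,A))
--     result =[]
--     for k,v in reversed(sorted(f_dict.items())):
--         result.append(v)
--     return result
-- ===== SOURCE B (Python) =====
-- def max_concennate(A):
--     def first_digit(item):
--         m = len(str(item)) - 1
--         return item // 10 ** m % 10
--     digits = set(first_digit(item) for item in A)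
--     result = []
--     for d in sorted(digits, reverse=True):
--         for item in reversed(A):
--             if first_digit(item) == d:
--                 result.append(item)
--                 break
--     return result
-- ===== Notes on version B (the rewrite author's own statement) =====
-- stated objective: alternative
-- what changed: Instead of zipping leading digits with items into an auto-overwriting dict and reverse-sorting its items, B sorts the set of leading digits descending and for each digit scans A once from the back for the last item with that digit.
import Mathlib
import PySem

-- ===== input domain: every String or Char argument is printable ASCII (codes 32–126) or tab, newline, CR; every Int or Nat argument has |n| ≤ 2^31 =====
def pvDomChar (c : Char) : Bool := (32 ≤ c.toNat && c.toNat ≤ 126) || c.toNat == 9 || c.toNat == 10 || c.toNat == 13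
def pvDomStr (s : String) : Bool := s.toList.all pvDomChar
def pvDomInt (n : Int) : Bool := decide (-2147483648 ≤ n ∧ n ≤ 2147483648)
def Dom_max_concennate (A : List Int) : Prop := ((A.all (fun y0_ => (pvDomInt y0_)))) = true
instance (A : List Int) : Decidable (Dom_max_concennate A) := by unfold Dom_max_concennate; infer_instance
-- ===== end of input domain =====

-- B replaces A's build-pair-dict-then-sort-items pipeline by sorting the set of leading
-- digits descending and scanning A from the back once per digit (alternative decomposition).

-- first digit arithmetic shared by both sources: item // 10**(len(str(item))-1) % 10;
-- m = len(str(item)) - 1 ≥ 0 always (str of an int is nonempty), so 10 ^ m.toNat is exact for pow(10, m)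
def firstDigit (item : Int) : Int :=
  let m : Int := PySem.Str.len (PySem.Int.toStr item) - 1
  PySem.Int.mod (PySem.Int.floordiv item (10 ^ m.toNat)) 10

-- ===== PORT A =====
def max_concennate (A : List Int) : List Int :=
  let f_lst : List Int := A.foldl (fun acc item => acc ++ [firstDigit item]) []
  let f_dict : PySem.Dict Int Int := PySem.Dict.ofList (f_lst.zip A)
  ((PySem.List.sorted2 f_dict.items Prod.fst Prod.snd false).reverse).foldl
    (fun result p => result ++ [p.2]) []

-- ===== PORT B =====
-- inner 'for item in reversed(A): if …: append; break' = find? on A.reverse, kept if it hits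
def max_concennate_alt (A : List Int) : List Int :=
  let digits : PySem.Set Int := PySem.Set.ofList (A.map firstDigit)
  (PySem.List.sorted digits (fun d => d) true).filterMap
    (fun d => A.reverse.find? (fun item => firstDigit item == d))

-- ===== PRECONDITION & SPEC =====
def Spec_max_concennate (A : List Int) (out : List Int) : Prop := out = max_concennate_alt A
instance (A : List Int) (out : List Int) : Decidable (Spec_max_concennate A out) := by unfold Spec_max_concennate; infer_instance

-- ===== CLAIM (what is proved, stated in full; the proofs are below) =====
def Claim_equal_max_concennate : Prop := ∀ (A : List Int), Dom_max_concennate A → Spec_max_concennate A (max_concennate A)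

-- ===== LEMMAS AND PROOFS =====

-- the lexicographic 'before' of sorted2 on pairs with DISTINCT first components is the fst order
lemma lex_before_of_ne (x y : Int × Int) (h : x.1 ≠ y.1) :
    (decide (x.1 < y.1) || !decide (y.1 < x.1) && decide (x.2 < y.2)) = decide (x.1 < y.1) := by
  by_cases hxy : x.1 < y.1
  · simp [hxy]
  · have : y.1 < x.1 := lt_of_le_of_ne (le_of_not_gt hxy) (Ne.symm h)
    simp [hxy, this]

-- inserting a mapped fresh key into a mapped accumulator = mapping the key insertion
lemma insertBy_map (G : Int → Int) (x : Int) (acc : List Int) (hx : x ∉ acc) :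
    PySem.List.insertBy (fun a b => decide (a.1 < b.1) || !decide (b.1 < a.1) && decide (a.2 < b.2))
      (x, G x) (acc.map (fun k => (k, G k)))
    = (PySem.List.insertBy (fun a b => decide (a < b)) x acc).map (fun k => (k, G k)) := by
  induction acc with
  | nil => rfl
  | cons y ys ih =>
    have hxy : x ≠ y := by intro h; exact hx (h ▸ List.mem_cons_self)
    have h1 := lex_before_of_ne (x, G x) (y, G y) hxy
    simp only [List.map_cons, PySem.List.insertBy] at *
    rw [h1]
    by_cases hlt : x < y
    · simp [hlt]
    · simp only [hlt, decide_false, Bool.false_eq_true, if_false]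
      rw [ih (fun hm => hx (List.mem_cons_of_mem _ hm)), List.map_cons]

-- the whole sorted2-fold over mapped pairs = mapping the sorted-fold over the keys
lemma foldl_insertBy_map (G : Int → Int) (l acc : List Int)
    (hnd : l.Nodup) (hdisj : ∀ x ∈ l, x ∉ acc) :
    l.foldl (fun acc x =>
        PySem.List.insertBy (fun a b => decide (a.1 < b.1) || !decide (b.1 < a.1) && decide (a.2 < b.2))
          (x, G x) acc) (acc.map (fun k => (k, G k)))
    = (l.foldl (fun acc x => PySem.List.insertBy (fun a b => decide (a < b)) x acc) acc).map
        (fun k => (k, G k)) := by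
  induction l generalizing acc with
  | nil => rfl
  | cons x xs ih =>
    simp only [List.foldl_cons]
    rw [insertBy_map G x acc (hdisj x List.mem_cons_self)]
    refine ih _ (List.nodup_cons.mp hnd).2 ?_
    intro z hz hmem
    rcases (PySem.List.insertBy_mem_iff _ _ _ _).mp hmem with h | h
    · exact (List.nodup_cons.mp hnd).1 (h ▸ hz)
    · exact hdisj z (List.mem_cons_of_mem _ hz) h

lemma sorted2_map_pairs (G : Int → Int) (l : List Int) (hnd : l.Nodup) :
    PySem.List.sorted2 (l.map (fun k => (k, G k))) Prod.fst Prod.snd false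
    = (PySem.List.sorted l (fun d => d) false).map (fun k => (k, G k)) := by
  have h2 : PySem.List.sorted2 (l.map (fun k => (k, G k))) Prod.fst Prod.snd false
      = (l.map (fun k => (k, G k))).foldl (fun acc x =>
          PySem.List.insertBy (fun a b => decide (a.1 < b.1) || !decide (b.1 < a.1) && decide (a.2 < b.2)) x acc) [] := rfl
  rw [h2, List.foldl_map, PySem.List.sorted_eq_foldl_insertBy]
  exact foldl_insertBy_map G l [] hnd (by simp)

-- reverse of an ascending sort of a duplicate-free list is the descending sort
lemma sorted_reverse_eq (l : List Int) (hnd : l.Nodup) :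
    (PySem.List.sorted l (fun d => d) false).reverse = PySem.List.sorted l (fun d => d) true := by
  have hperm : (PySem.List.sorted l (fun d => d) false).Perm l := PySem.List.sorted_perm l _ false
  have hnd' : (PySem.List.sorted l (fun d => d) false).Nodup := hperm.nodup_iff.mpr hnd
  have hle : (PySem.List.sorted l (fun d => d) false).Pairwise (fun a b => a ≤ b) :=
    PySem.List.sorted_pairwise l _
  have hlt : (PySem.List.sorted l (fun d => d) false).Pairwise (fun a b => a < b) :=
    (hnd'.and hle).imp (fun h => lt_of_le_of_ne h.2 h.1)
  exact (PySem.List.sorted_rev_eq_of_perm_of_pairwise_gt l _ (fun d => d)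
    ((List.reverse_perm _).trans hperm)
    (List.pairwise_reverse.mpr hlt)).symm

-- lookup of a fold of inserts: last pair wins, else the starting dict
lemma get?_foldl_insert (ps : List (Int × Int)) (d : PySem.Dict Int Int) (k : Int) :
    (ps.foldl (fun acc p => acc.insert p.1 p.2) d).get? k
    = ((ps.reverse.find? (fun p => p.1 == k)).map Prod.snd).or (d.get? k) := by
  induction ps generalizing d with
  | nil => simp
  | cons p ps ih =>
    simp only [List.foldl_cons, List.reverse_cons, List.find?_append]
    rw [ih]
    cases h : ps.reverse.find? (fun p => p.1 == k) with
    | some q => simp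
    | none =>
      simp only [Option.map_none, Option.none_or, List.find?]
      rw [PySem.Dict.get?_insert]
      by_cases hk : p.1 = k
      · simp [hk]
      · have hb : (p.1 == k) = false := by simp [hk]
        simp [hb, Ne.symm hk]

lemma filterMap_eq_map_of_some {α β : Type} (l : List α) (f : α → Option β) (g : α → β)
    (h : ∀ x ∈ l, f x = some (g x)) : l.filterMap f = l.map g := by
  induction l with
  | nil => rfl
  | cons x xs ih =>
    simp only [List.filterMap_cons, h x List.mem_cons_self, List.map_cons]
    exact congrArg _ (ih (fun y hy => h y (List.mem_cons_of_mem _ hy)))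

lemma zip_map_self (f : Int → Int) (l : List Int) :
    (l.map f).zip l = l.map (fun x => (f x, x)) := by
  induction l with
  | nil => rfl
  | cons x xs ih => simp [ih]

lemma flatMap_single {α β : Type} (f : α → β) (l : List α) :
    l.flatMap (fun x => [f x]) = l.map f := by
  induction l with
  | nil => rfl
  | cons x xs ih => simp [ih]

lemma keys_ofList_pairs (ps : List (Int × Int)) :
    (PySem.Dict.ofList ps).keys = PySem.Set.ofList (ps.map Prod.fst) := by
  show (ps.foldl (fun (acc : PySem.Dict Int Int) (p : Int × Int) => acc.insert p.1 p.2)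
      PySem.Dict.empty).keys = _
  simp only [PySem.Dict.keys_foldl_insert_key, PySem.Dict.keys_empty, PySem.Set.update_nil_left]

lemma get?_ofList_pairs (ps : List (Int × Int)) (k : Int) :
    (PySem.Dict.ofList ps).get? k = (ps.reverse.find? (fun p => p.1 == k)).map Prod.snd := by
  show (ps.foldl (fun (acc : PySem.Dict Int Int) (p : Int × Int) => acc.insert p.1 p.2)
      PySem.Dict.empty).get? k = _
  rw [get?_foldl_insert, PySem.Dict.get?_empty, Option.or_none]

-- ===== VERDICT (by name: the statement is the Claim_ definition above) =====
theorem max_concennate_spec : Claim_equal_max_concennate := by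
  intro A _
  unfold Spec_max_concennate max_concennate max_concennate_alt
  simp only [PySem.List.foldl_append_eq_flatMap, List.nil_append, flatMap_single, zip_map_self]
  set D : List Int := PySem.Set.ofList (A.map firstDigit) with hD
  have hndD : D.Nodup := PySem.Set.nodup_ofList _
  set fd : PySem.Dict Int Int := PySem.Dict.ofList (A.map (fun x => (firstDigit x, x))) with hfd
  have hkeys : fd.keys = D := by
    rw [hfd, keys_ofList_pairs, List.map_map, hD]; rfl
  have hndk : fd.keys.Nodup := hkeys ▸ hndD
  have hget : ∀ k : Int, fd.get? k = A.reverse.find? (fun item => firstDigit item == k) := by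
    intro k
    rw [hfd, get?_ofList_pairs, ← List.map_reverse, List.find?_map, Option.map_map]
    simp [Function.comp_def]
  have hitems : fd.items = D.map (fun k => (k, fd.getD k 0)) := by
    rw [← hkeys]; exact PySem.Dict.items_eq_map_keys fd hndk 0
  rw [hitems, sorted2_map_pairs _ D hndD, ← List.map_reverse, sorted_reverse_eq D hndD,
    List.map_map]
  rw [filterMap_eq_map_of_some _ _ (fun k => fd.getD k 0) ?_]
  · rfl
  intro k hk
  have hkD : k ∈ D := (PySem.List.sorted_perm D (fun d => d) true).mem_iff.mp hk
  have hkA : k ∈ A.map firstDigit := (PySem.Set.mem_ofList _ _).mp hkD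
  obtain ⟨x, hxA, hx⟩ := List.mem_map.mp hkA
  have hsome : (A.reverse.find? (fun item => firstDigit item == k)).isSome := by
    rw [List.find?_isSome]
    exact ⟨x, List.mem_reverse.mpr hxA, by simp [hx]⟩
  obtain ⟨v, hv⟩ := Option.isSome_iff_exists.mp hsome
  rw [hv]
  show some v = some (fd.getD k 0)
  rw [PySem.Dict.getD_eq_get?_getD, hget k, hv]
  rfl
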